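-- pv_equiv track=rewrite | github.com/yashank-mittal/Prepfortech | B13/Subhendu/Sorting/reduced-formm.py | solution
-- ===== SOURCE A (Python) =====
-- def solution(arr):
--     copy_arr = arr[:]
--     copy_arr.sort()
--     index_dict = {}
--     for idx, attr in enumerate(copy_arr):
--         index_dict[attr] = idx
--
--     ans = []
--     for i in arr:
--         ans.append(index_dict[i])
--     return ans
-- ===== SOURCE B (Python) =====
-- def _bisect_right(s, x):
--     lo, hi = 0, len(s)
--     while lo < hi:
--         mid = (lo + hi) // 2
--         if x < s[mid]:
--             hi = mid
--         else:
--             lo = mid + 1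
--     return lo
--
--
-- def solution(arr):
--     s = sorted(arr)
--     return [_bisect_right(s, x) - 1 for x in arr]
-- ===== Notes on version B (the rewrite author's own statement) =====
-- stated objective: alternative
-- what changed: Replaces the value-to-last-index dictionary built over the sorted copy with a hand-written bisect_right binary search on the sorted copy (rank of x = bisect_right(s, x) - 1), so no dictionary is built at all.
import Mathlib
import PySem

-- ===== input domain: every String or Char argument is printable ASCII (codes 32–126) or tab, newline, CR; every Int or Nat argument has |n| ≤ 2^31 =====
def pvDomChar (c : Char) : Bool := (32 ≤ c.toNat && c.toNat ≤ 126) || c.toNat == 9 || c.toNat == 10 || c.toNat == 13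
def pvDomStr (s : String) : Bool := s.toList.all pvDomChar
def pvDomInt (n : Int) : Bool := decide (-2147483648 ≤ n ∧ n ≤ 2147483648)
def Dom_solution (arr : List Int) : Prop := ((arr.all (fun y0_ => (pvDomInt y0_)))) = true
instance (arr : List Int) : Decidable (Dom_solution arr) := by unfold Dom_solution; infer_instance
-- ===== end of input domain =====

-- B replaces A's value→last-index dictionary over the sorted copy with a hand-written
-- bisect_right binary search on the sorted copy (rank = bisect_right(s, x) - 1); same cost,
-- different algorithm (objective: alternative).

-- ===== PORT A =====
def solution (arr : List Int) : List Int :=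
  let copyArr := arr                                     -- copy_arr = arr[:] (same value)
  let sortedArr := PySem.List.sorted copyArr (fun v => v) false   -- copy_arr.sort()
  let indexDict := (PySem.List.enumerate sortedArr 0).foldl
      (fun d p => d.insert p.2 p.1) (PySem.Dict.empty : PySem.Dict Int Int)
  -- index_dict[i]: every i ∈ arr occurs in sortedArr (a permutation of arr), so the
  -- lookup always succeeds and the default 0 is unreachable.
  arr.foldl (fun ans i => ans ++ [(indexDict.get? i).getD 0]) []

-- ===== PORT B =====
-- literal port of Source B's _bisect_right while-loop (mid = (lo+hi)//2 written inline);
-- mid < len(s) whenever called with hi ≤ len(s), so the getD default 0 is unreachable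
def bisectRightGo (s : List Int) (x : Int) (lo hi : Nat) : Nat :=
  if _h : lo < hi then
    if x < s.getD ((lo + hi) / 2) 0 then bisectRightGo s x lo ((lo + hi) / 2)
    else bisectRightGo s x ((lo + hi) / 2 + 1) hi
  else lo
termination_by hi - lo
decreasing_by all_goals omega

def solution_alt (arr : List Int) : List Int :=
  let s := PySem.List.sorted arr (fun v => v) false
  arr.map (fun x => (bisectRightGo s x 0 s.length : Int) - 1)

-- ===== PRECONDITION & SPEC =====
def Spec_solution (arr : List Int) (out : List Int) : Prop := out = solution_alt arr
instance (arr : List Int) (out : List Int) : Decidable (Spec_solution arr out) := by unfold Spec_solution; infer_instance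

-- ===== CLAIM (what is proved, stated in full; the proofs are below) =====
def Claim_equal_solution : Prop := ∀ (arr : List Int), Dom_solution arr → Spec_solution arr (solution arr)

-- ===== LEMMAS AND PROOFS =====

-- monotone access into a ≤-sorted list
theorem sorted_getElem_mono {s : List Int} (hs : s.Pairwise (· ≤ ·)) {i j : Nat}
    (hj : j < s.length) (hij : i ≤ j) : s[i]'(lt_of_le_of_lt hij hj) ≤ s[j] := by
  rcases eq_or_lt_of_le hij with rfl | h
  · exact le_refl _
  · exact (List.pairwise_iff_getElem.1 hs) i j _ hj h

-- in a ≤-sorted list, s[j] ≤ x exactly for the first countP (≤ x) positions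
theorem sorted_le_iff {s : List Int} (hs : s.Pairwise (· ≤ ·)) (x : Int) :
    ∀ j (hj : j < s.length), (s[j] ≤ x ↔ j < s.countP (fun y => decide (y ≤ x))) := by
  induction s with
  | nil => intro j hj; simp at hj
  | cons a t ih =>
    rw [List.pairwise_cons] at hs
    intro j hj
    by_cases hax : a ≤ x
    · have hbt : (decide (a ≤ x)) = true := by simpa using hax
      rw [List.countP_cons, if_pos hbt]
      cases j with
      | zero => exact iff_of_true hax (by omega)
      | succ k =>
        simp only [List.getElem_cons_succ]
        rw [ih hs.2 k (by simpa using hj)]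
        omega
    · have ht0 : t.countP (fun y => decide (y ≤ x)) = 0 := by
        rw [List.countP_eq_zero]
        intro y hy
        simp only [decide_eq_true_eq]
        exact fun hyx => hax (le_trans (hs.1 y hy) hyx)
      have hbf : ¬ ((decide (a ≤ x)) = true) := by simpa using hax
      rw [List.countP_cons, if_neg hbf, ht0]
      cases j with
      | zero => exact iff_of_false hax (by omega)
      | succ k =>
        simp only [List.getElem_cons_succ]
        refine iff_of_false (fun hk => ?_) (by omega)
        exact absurd (le_trans (hs.1 _ (List.getElem_mem _)) hk) hax

-- a position bracketed by the invariant equals countP (≤ x)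
theorem bisect_done {s : List Int} (hs : s.Pairwise (· ≤ ·)) (x : Int) (lo : Nat)
    (hlo : lo ≤ s.length)
    (hlow : ∀ j (hj : j < s.length), j < lo → s[j] ≤ x)
    (hhigh : ∀ j (hj : j < s.length), lo ≤ j → ¬ s[j] ≤ x) :
    lo = s.countP (fun y => decide (y ≤ x)) := by
  have hc : s.countP (fun y => decide (y ≤ x)) ≤ s.length := List.countP_le_length
  by_contra hne
  rcases Nat.lt_or_ge lo (s.countP (fun y => decide (y ≤ x))) with h | h
  · have hlt : lo < s.length := lt_of_lt_of_le h hc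
    exact hhigh lo hlt (le_refl _) ((sorted_le_iff hs x lo hlt).2 h)
  · have h' : s.countP (fun y => decide (y ≤ x)) < lo := by omega
    have hlt : s.countP (fun y => decide (y ≤ x)) < s.length := by omega
    have := hlow _ hlt h'
    rw [sorted_le_iff hs x _ hlt] at this
    omega

-- the binary search computes countP (≤ x) under the standard invariant
theorem bisect_inv {s : List Int} (hs : s.Pairwise (· ≤ ·)) (x : Int) :
    ∀ d lo hi, hi - lo ≤ d → lo ≤ hi → hi ≤ s.length →
      (∀ j (hj : j < s.length), j < lo → s[j] ≤ x) →
      (∀ j (hj : j < s.length), hi ≤ j → ¬ s[j] ≤ x) →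
      bisectRightGo s x lo hi = s.countP (fun y => decide (y ≤ x)) := by
  intro d
  induction d with
  | zero =>
    intro lo hi hd hlohi hhi hlow hhigh
    have hlo : lo = hi := by omega
    subst hlo
    rw [bisectRightGo, dif_neg (by omega)]
    exact bisect_done hs x lo hhi hlow hhigh
  | succ d ih =>
    intro lo hi hd hlohi hhi hlow hhigh
    rw [bisectRightGo]
    by_cases hlh : lo < hi
    · rw [dif_pos hlh]
      have hmid1 : (lo + hi) / 2 < hi := by omega
      have hmid2 : lo ≤ (lo + hi) / 2 := by omega
      have hmlen : (lo + hi) / 2 < s.length := lt_of_lt_of_le hmid1 hhi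
      rw [List.getD_eq_getElem s 0 hmlen]
      by_cases hxs : x < s[(lo + hi) / 2]
      · rw [if_pos hxs]
        exact ih lo _ (by omega) hmid2 (le_of_lt hmlen) hlow
          (fun j hj hmj => fun hle =>
            absurd (lt_of_lt_of_le hxs (sorted_getElem_mono hs hj hmj)) (not_lt.2 hle))
      · rw [if_neg hxs]
        exact ih _ hi (by omega) (by omega) hhi
          (fun j hj hjm =>
            le_trans (sorted_getElem_mono hs hmlen (by omega)) (not_lt.1 hxs))
          hhigh
    · rw [dif_neg hlh]
      have : lo = hi := by omega
      subst this
      exact bisect_done hs x lo hhi hlow hhigh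

theorem bisect_eq {s : List Int} (hs : s.Pairwise (· ≤ ·)) (x : Int) :
    bisectRightGo s x 0 s.length = s.countP (fun y => decide (y ≤ x)) :=
  bisect_inv hs x s.length 0 s.length (by omega) (by omega) (le_refl _)
    (by omega) (fun j hj hle => by omega)

-- folding dict-inserts: the lookup is the last pair written with that key
theorem foldl_insert_get? (x : Int) :
    ∀ (L : List (Int × Int)) (d : PySem.Dict Int Int),
      ((L.foldl (fun d p => d.insert p.2 p.1) d).get? x) =
        (match L.reverse.find? (fun p => p.2 == x) with
         | some p => some p.1
         | none => d.get? x) := by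
  intro L
  induction L with
  | nil => intro d; simp
  | cons p L' ih =>
    obtain ⟨v, k⟩ := p
    intro d
    rw [List.foldl_cons, ih, List.reverse_cons, List.find?_append]
    cases hf : L'.reverse.find? (fun p => p.2 == x) with
    | some q => simp [Option.some_or]
    | none =>
      simp only [Option.none_or, List.find?_cons]
      by_cases hkx : k = x
      · subst hkx
        simp [PySem.Dict.get?_insert_self]
      · have : ((v, k).2 == x) = false := by simpa using hkx
        rw [this, List.find?_nil]
        exact PySem.Dict.get?_insert_of_ne d v (fun h => hkx h.symm)

-- A's dictionary lookup over the sorted copy is countP (≤ x) - 1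
theorem dict_get {s : List Int} (hs : s.Pairwise (· ≤ ·)) {x : Int} (hx : x ∈ s) :
    ((PySem.List.enumerate s 0).foldl (fun d p => d.insert p.2 p.1)
        (PySem.Dict.empty : PySem.Dict Int Int)).get? x
      = some ((s.countP (fun y => decide (y ≤ x)) : Int) - 1) := by
  set c := s.countP (fun y => decide (y ≤ x)) with hc
  obtain ⟨k, hk, hkx⟩ := List.getElem_of_mem hx
  have hkc : k < c := (sorted_le_iff hs x k hk).1 (le_of_eq hkx)
  have hclen : c ≤ s.length := List.countP_le_length
  have hc1 : 1 ≤ c := by omega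
  have hc1len : c - 1 < s.length := by omega
  have hsc : s[c - 1] = x := by
    have h1 : s[c - 1] ≤ x := (sorted_le_iff hs x (c - 1) hc1len).2 (by omega)
    have h2 : x ≤ s[c - 1] := hkx ▸ sorted_getElem_mono hs hc1len (by omega)
    exact le_antisymm h1 h2
  rw [foldl_insert_get? x]
  have hlen : (PySem.List.enumerate s 0).length = s.length := PySem.List.length_enumerate s 0
  have hfind : (PySem.List.enumerate s 0).reverse.find? (fun p => p.2 == x)
      = some (((c : Int) - 1), x) := by
    rw [List.find?_eq_some_iff_getElem]
    refine ⟨by simp, s.length - c, by simp only [List.length_reverse, hlen]; omega, ?_, ?_⟩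
    · rw [List.getElem_reverse]
      have hidx : (PySem.List.enumerate s 0).length - 1 - (s.length - c) = c - 1 := by
        rw [hlen]; omega
      simp only [hidx]
      rw [PySem.List.getElem_enumerate s 0 (c - 1) (by rw [hlen]; omega)]
      simp only [hsc, Prod.mk.injEq, and_true]
      omega
    · intro j hj
      rw [List.getElem_reverse]
      have hm : (PySem.List.enumerate s 0).length - 1 - j = s.length - 1 - j := by
        rw [hlen]
      simp only [hm]
      have hjlt : j < s.length - c := by
        simpa only [List.length_reverse, hlen] using hj
      have hmlt : s.length - 1 - j < s.length := by omega
      rw [PySem.List.getElem_enumerate s 0 (s.length - 1 - j) (by rw [hlen]; omega)]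
      have hmge : c ≤ s.length - 1 - j := by omega
      have hnle : ¬ s[s.length - 1 - j] ≤ x := fun hle => by
        have := (sorted_le_iff hs x _ hmlt).1 hle
        omega
      simpa using fun h => hnle (le_of_eq h)
  rw [hfind]

theorem foldl_append_map (g : Int → Int) :
    ∀ (l : List Int) (acc : List Int),
      l.foldl (fun ans i => ans ++ [g i]) acc = acc ++ l.map g := by
  intro l
  induction l with
  | nil => simp
  | cons a t ih => intro acc; simp [ih, List.append_assoc]

-- ===== VERDICT (by name: the statement is the Claim_ definition above) =====
theorem solution_spec : Claim_equal_solution := by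
  intro arr _
  unfold Spec_solution solution solution_alt
  simp only []
  rw [foldl_append_map, List.nil_append]
  apply List.map_congr_left
  intro x hx
  have hs : (PySem.List.sorted arr (fun v => v) false).Pairwise (· ≤ ·) :=
    PySem.List.sorted_pairwise arr (fun v => v)
  have hxs : x ∈ PySem.List.sorted arr (fun v => v) false :=
    ((PySem.List.sorted_perm arr (fun v => v) false).mem_iff).2 hx
  rw [dict_get hs hxs, bisect_eq hs x]
  simp
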